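-- pv_equiv track=rewrite | github.com/rkneusel9/MathForProgramming | ch07/ntheory.py | HighlyComposite
-- ===== SOURCE A (Python) =====
-- def Divisors(n):
--     """Return the divisors of n"""
--     d = []
--     for i in range(1,n//2+1):
--         if ((n%i) == 0):
--             d.append(i)
--     d.append(n)
--     return d
--
-- def HighlyComposite(n):
--     """Return a list of highly composite numbers up to n"""
--     if (n < 2):
--         return [1]
--     dv = [len(Divisors(i)) for i in range(1,n+1)]
--     hc = [1]
--     for k in range(1,len(dv)):
--         if (dv[k] > max(dv[:k])):
--             hc.append(k+1)
--     return hc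
-- ===== SOURCE B (Python) =====
-- def HighlyComposite(n):
--     """Return a list of highly composite numbers up to n"""
--     if n < 2:
--         return [1]
--     # divisor-count sieve: cnt[m] = number of divisors of m
--     cnt = [0] * (n + 1)
--     for d in range(1, n + 1):
--         for q in range(1, n // d + 1):
--             cnt[d * q] += 1
--     # single pass with a running maximum
--     hc = [1]
--     best = cnt[1]
--     for k in range(2, n + 1):
--         if cnt[k] > best:
--             hc.append(k)
--             best = cnt[k]
--     return hc
-- ===== Notes on version B (the rewrite author's own statement) =====
-- stated objective: faster
-- what changed: Replaces per-number trial-division divisor lists and a prefix-max rescan of dv[:k] with a divisor-count sieve (increment every multiple) and a running maximum in one pass.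
import Mathlib
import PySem

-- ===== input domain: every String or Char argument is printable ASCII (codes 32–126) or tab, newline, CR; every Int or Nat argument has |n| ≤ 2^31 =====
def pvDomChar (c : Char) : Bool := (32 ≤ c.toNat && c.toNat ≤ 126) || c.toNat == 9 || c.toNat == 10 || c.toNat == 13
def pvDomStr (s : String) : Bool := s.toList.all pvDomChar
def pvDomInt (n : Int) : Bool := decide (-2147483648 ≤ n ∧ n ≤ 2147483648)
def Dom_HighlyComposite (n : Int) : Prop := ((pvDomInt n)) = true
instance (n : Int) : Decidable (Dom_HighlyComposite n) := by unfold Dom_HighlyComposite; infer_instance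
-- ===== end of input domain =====

set_option maxHeartbeats 1000000

-- B replaces A's per-number trial division and prefix-max rescans by a divisor-count sieve
-- and a running maximum; the return values are proved identical for every n.

-- ===== PORT A =====
-- Divisors: d = []; for i in range(1, n//2+1): if n % i == 0: d.append(i); d.append(n)
def DivisorsA (n : Int) : List Int :=
  ((PySem.List.pyRange 1 (PySem.Int.floordiv n 2 + 1) 1).foldl
    (fun d i => if PySem.Int.mod n i == 0 then d ++ [i] else d) []) ++ [n]

def HighlyComposite (n : Int) : List Int :=
  if n < 2 then [1] else
    let dv : List Int := (PySem.List.pyRange 1 (n + 1) 1).map (fun i => ((DivisorsA i).length : Int))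
    -- max(dv[:k]) with 1 ≤ k: the slice is nonempty, so max? is some and .getD 0 is exact
    (PySem.List.pyRange 1 (dv.length : Int) 1).foldl
      (fun hc k =>
        if (PySem.List.max? (PySem.List.slice dv none (some k)) (fun x => x)).getD 0 <
            PySem.List.pyGetD dv k 0
        then hc ++ [k + 1] else hc) [1]

-- ===== PORT B =====
def HighlyComposite_alt (n : Int) : List Int :=
  if n < 2 then [1] else
    -- divisor-count sieve: for d in 1..n, for q in 1..n//d, cnt[d*q] += 1 (index d*q ≤ n is in range)
    let cnt : List Int :=
      (PySem.List.pyRange 1 (n + 1) 1).foldl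
        (fun cnt d =>
          (PySem.List.pyRange 1 (PySem.Int.floordiv n d + 1) 1).foldl
            (fun cnt q =>
              PySem.List.pySetD cnt (d * q) (PySem.List.pyGetD cnt (d * q) 0 + 1)) cnt)
        (List.replicate (n + 1).toNat 0)
    -- single pass with running maximum
    let st :=
      (PySem.List.pyRange 2 (n + 1) 1).foldl
        (fun st k =>
          if st.2 < PySem.List.pyGetD cnt k 0 then (st.1 ++ [k], PySem.List.pyGetD cnt k 0) else st)
        (([1] : List Int), PySem.List.pyGetD cnt 1 0)
    st.1

-- ===== PRECONDITION & SPEC =====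
def Spec_HighlyComposite (n : Int) (out : List Int) : Prop := out = HighlyComposite_alt n
instance (n : Int) (out : List Int) : Decidable (Spec_HighlyComposite n out) := by unfold Spec_HighlyComposite; infer_instance

-- ===== CLAIM (what is proved, stated in full; the proofs are below) =====
def Claim_equal_HighlyComposite : Prop := ∀ (n : Int), Dom_HighlyComposite n → Spec_HighlyComposite n (HighlyComposite n)

-- ===== LEMMAS AND PROOFS =====

-- pvC D m = #{d ∈ [1..D] : d ∣ m}, the divisor-counting spec shared by both programs
def pvC (D m : Nat) : Nat := ((List.range D).filter (fun t => m % (t + 1) == 0)).length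

-- pvPM g j = max (g 1) … (g (j+1)), the prefix maximum
def pvPM (g : Nat → Int) : Nat → Int
  | 0 => g 1
  | j + 1 => max (pvPM g j) (g (j + 2))

-- B's sieve loop with d running over 1..j, as a function of j, for the outer induction
def pvSieve (N j : Nat) : List Int :=
  (PySem.List.pyRange 1 ((j : Int) + 1) 1).foldl
    (fun cnt d =>
      (PySem.List.pyRange 1 (PySem.Int.floordiv (N : Int) d + 1) 1).foldl
        (fun cnt q =>
          PySem.List.pySetD cnt (d * q) (PySem.List.pyGetD cnt (d * q) 0 + 1)) cnt)
    (List.replicate (N + 1) 0)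

lemma pvC_succ (D m : Nat) :
    pvC (D + 1) m = pvC D m + (if m % (D + 1) == 0 then 1 else 0) := by
  by_cases h : m % (D + 1) = 0 <;>
    simp [pvC, List.range_succ, List.filter_append, h]

lemma no_mid_divisor (m d : Nat) (h1 : m / 2 < d) (h2 : d < m) : ¬ m % d = 0 := by
  intro h
  obtain ⟨c, hc⟩ := Nat.dvd_of_mod_eq_zero h
  rcases c with _ | _ | c
  · omega
  · omega
  · have h3 : d * 2 ≤ d * (c + 1 + 1) := Nat.mul_le_mul_left d (by omega)
    omega

lemma pvRange_eq (b : Nat) :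
    PySem.List.pyRange 1 ((b : Int) + 1) 1 = (List.range b).map (fun k : Nat => (1 : Int) + (k : Int)) := by
  induction b with
  | zero =>
    rw [show (((0 : Nat) : Int) + 1) = 1 by norm_num, PySem.List.pyRange_one_eq_nil le_rfl]
    simp
  | succ b ih =>
    rw [show (((b + 1 : Nat) : Int) + 1) = ((b : Int) + 1) + 1 by push_cast; ring,
      PySem.List.pyRange_one_succ_right (show (1 : Int) ≤ (b : Int) + 1 by omega), ih,
      List.range_succ, List.map_append]
    simp [add_comm]

-- A's trial-division divisor list has length pvC m m
lemma divisorsA_length (m : Nat) (hm : 1 ≤ m) :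
    (DivisorsA (m : Int)).length = pvC m m := by
  have hfd : PySem.Int.floordiv (m : Int) 2 = ((m / 2 : Nat) : Int) := by
    exact_mod_cast PySem.Int.floordiv_natCast m 2
  have hrange : PySem.List.pyRange 1 (((m / 2 : Nat) : Int) + 1) 1
      = (List.range (m / 2)).map (fun k : Nat => (1 : Int) + (k : Int)) := pvRange_eq (m / 2)
  simp only [DivisorsA]
  rw [hfd, hrange, PySem.List.foldl_append_if_eq_filter, List.nil_append, List.length_append,
    List.filter_map, List.length_map]
  simp only [List.length_cons, List.length_nil]
  have hpc : ((List.range (m / 2)).filter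
      ((fun i => PySem.Int.mod (m : Int) i == 0) ∘ (fun k : Nat => (1 : Int) + (k : Int)))).length
      = pvC (m / 2) m := by
    unfold pvC
    refine congrArg List.length (List.filter_congr ?_)
    intro k _
    simp only [Function.comp_apply]
    rw [show (1 : Int) + (k : Int) = ((k + 1 : Nat) : Int) by push_cast; ring,
      PySem.Int.mod_natCast]
    by_cases h : m % (k + 1) = 0
    · simp [h]
    · have hnd : ¬ ((k : Int) + 1) ∣ (m : Int) := by
        rw [show ((k : Int) + 1) = ((k + 1 : Nat) : Int) by push_cast; ring,
          Int.natCast_dvd_natCast]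
        intro hd
        obtain ⟨c, hc⟩ := hd
        exact h (by rw [hc]; exact Nat.mul_mod_right (k + 1) c)
      simp [h, hnd]
  rw [hpc]
  have step : ∀ i, m / 2 + i ≤ m - 1 → pvC (m / 2 + i) m = pvC (m / 2) m := by
    intro i
    induction i with
    | zero => intro _; rfl
    | succ i ih =>
      intro h
      have hno := no_mid_divisor m (m / 2 + i + 1) (by omega) (by omega)
      have hb : (m % (m / 2 + i + 1) == 0) = false := by simp [hno]
      have hs := pvC_succ (m / 2 + i) m
      rw [show m / 2 + (i + 1) = m / 2 + i + 1 by omega, hs, hb, ih (by omega)]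
      simp
  have hlast : pvC m m = pvC (m - 1) m + 1 := by
    have h := pvC_succ (m - 1) m
    rw [show m - 1 + 1 = m by omega] at h
    rw [h, Nat.mod_self]
    simp
  have hmid := step (m - 1 - m / 2) (by omega)
  rw [show m / 2 + (m - 1 - m / 2) = m - 1 by omega] at hmid
  omega

-- sieve inner loop: adds 1 exactly at the positions d*q, q ∈ L
lemma sieve_inner (dd : Int) (hd : 1 ≤ dd) (L : List Int) :
    ∀ cnt : List Int, L.Nodup → (∀ q ∈ L, 1 ≤ q) →
    (L.foldl (fun c q =>
        PySem.List.pySetD c (dd * q) (PySem.List.pyGetD c (dd * q) 0 + 1)) cnt).length = cnt.length ∧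
    ∀ m : Nat, m < cnt.length →
      (L.foldl (fun c q =>
        PySem.List.pySetD c (dd * q) (PySem.List.pyGetD c (dd * q) 0 + 1)) cnt).getD m 0 =
      cnt.getD m 0 + (if (m : Int) ∈ L.map (fun q => dd * q) then 1 else 0) := by
  induction L with
  | nil => intro cnt _ _; simp
  | cons q L ih =>
    intro cnt hL hpos
    have hq1 : 1 ≤ q := hpos q (List.mem_cons_self ..)
    have hnn : 0 ≤ dd * q := mul_nonneg (by omega) (by omega)
    have hcast : dd * q = (((dd * q).toNat : Nat) : Int) := (Int.toNat_of_nonneg hnn).symm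
    have hstep : PySem.List.pySetD cnt (dd * q) (PySem.List.pyGetD cnt (dd * q) 0 + 1)
        = cnt.set (dd * q).toNat (cnt.getD (dd * q).toNat 0 + 1) := by
      conv_lhs => rw [hcast]
      rw [PySem.List.pyGetD_natCast, PySem.List.pySetD_natCast]
    simp only [List.foldl_cons]
    rw [hstep]
    have hlen' : (cnt.set (dd * q).toNat (cnt.getD (dd * q).toNat 0 + 1)).length = cnt.length :=
      List.length_set ..
    obtain ⟨ihlen, ihval⟩ := ih (cnt.set (dd * q).toNat (cnt.getD (dd * q).toNat 0 + 1))
      hL.of_cons (fun q' hq' => hpos q' (List.mem_cons_of_mem _ hq'))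
    refine ⟨by rw [ihlen, hlen'], ?_⟩
    intro m hm
    rw [ihval m (by rw [hlen']; exact hm)]
    have key : (cnt.set (dd * q).toNat (cnt.getD (dd * q).toNat 0 + 1)).getD m 0
        = cnt.getD m 0 + (if (m : Int) = dd * q then 1 else 0) := by
      by_cases hmj : (m : Int) = dd * q
      · have hj : (dd * q).toNat = m := by omega
        rw [hj, if_pos hmj, List.getD_eq_getElem?_getD, List.getElem?_set]
        simp [hm]
      · have hj : (dd * q).toNat ≠ m := by omega
        rw [if_neg hmj, List.getD_eq_getElem?_getD, List.getElem?_set, if_neg hj,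
          ← List.getD_eq_getElem?_getD]
        simp
    rw [key]
    by_cases hmq : (m : Int) = dd * q
    · have hnotL : ¬ (m : Int) ∈ L.map (fun q => dd * q) := by
        intro hmm
        obtain ⟨q', hq'L, hq'e⟩ := List.mem_map.mp hmm
        have hqq : q' = q := mul_left_cancel₀ (show dd ≠ 0 by omega) (by rw [hq'e, hmq])
        exact (List.nodup_cons.mp hL).1 (hqq ▸ hq'L)
      have hmem : (m : Int) ∈ ((q :: L).map fun q => dd * q) := by
        simp only [List.map_cons, List.mem_cons]
        exact Or.inl hmq
      rw [if_pos hmq, if_neg hnotL, if_pos hmem]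
      omega
    · have hiff : ((m : Int) ∈ ((q :: L).map fun q => dd * q)) ↔
          ((m : Int) ∈ L.map fun q => dd * q) := by
        simp only [List.map_cons, List.mem_cons]
        constructor
        · rintro (h | h)
          · exact absurd h hmq
          · exact h
        · exact Or.inr
      rw [if_neg hmq]
      by_cases h2 : (m : Int) ∈ L.map (fun q => dd * q)
      · rw [if_pos h2, if_pos (hiff.mpr h2)]
        omega
      · rw [if_neg h2, if_neg (fun hh => h2 (hiff.mp hh))]
        omega

-- sieve outer loop: after d = 1..j, cnt[m] = pvC j m for 1 ≤ m ≤ N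
lemma sieve_outer (N : Nat) : ∀ j, j ≤ N →
    (pvSieve N j).length = N + 1 ∧
    ∀ m : Nat, 1 ≤ m → m ≤ N → (pvSieve N j).getD m 0 = (pvC j m : Int) := by
  intro j
  induction j with
  | zero =>
    intro _
    have h0 : pvSieve N 0 = List.replicate (N + 1) 0 := by
      unfold pvSieve
      rw [show (((0 : Nat) : Int) + 1) = 1 by norm_num, PySem.List.pyRange_one_eq_nil le_rfl,
        List.foldl_nil]
    refine ⟨by rw [h0]; simp, ?_⟩
    intro m _ _
    rw [h0]
    simp [pvC, List.getD_eq_getElem?_getD, List.getElem?_replicate]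
    split <;> simp
  | succ j ih =>
    intro hj
    obtain ⟨ihlen, ihval⟩ := ih (by omega)
    have h1j : (1 : Int) ≤ (j : Int) + 1 := by omega
    have hsucc : pvSieve N (j + 1) =
        (PySem.List.pyRange 1 (((N / (j + 1) : Nat) : Int) + 1) 1).foldl
          (fun cnt q => PySem.List.pySetD cnt (((j : Int) + 1) * q)
            (PySem.List.pyGetD cnt (((j : Int) + 1) * q) 0 + 1))
          (pvSieve N j) := by
      unfold pvSieve
      rw [show (((j + 1 : Nat) : Int) + 1) = ((j : Int) + 1) + 1 by push_cast; ring]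
      rw [PySem.List.pyRange_one_succ_right h1j]
      simp only [List.foldl_append, List.foldl_cons, List.foldl_nil]
      rw [show PySem.Int.floordiv (N : Int) ((j : Int) + 1) = ((N / (j + 1) : Nat) : Int) by
        rw [show ((j : Int) + 1) = ((j + 1 : Nat) : Int) by push_cast; ring]
        exact_mod_cast PySem.Int.floordiv_natCast N (j + 1)]
    have hpos : ∀ q ∈ PySem.List.pyRange 1 (((N / (j + 1) : Nat) : Int) + 1) 1, 1 ≤ q := by
      intro q hq
      exact ((PySem.List.mem_pyRange_one).mp hq).1
    obtain ⟨hlen2, hval2⟩ := sieve_inner ((j : Int) + 1) h1j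
      (PySem.List.pyRange 1 (((N / (j + 1) : Nat) : Int) + 1) 1) (pvSieve N j)
      (PySem.List.nodup_pyRange_one _ _) hpos
    refine ⟨by rw [hsucc, hlen2, ihlen], ?_⟩
    intro m h1m hmN
    rw [hsucc, hval2 m (by rw [ihlen]; omega), ihval m h1m hmN]
    have hiff : ((m : Int) ∈ (PySem.List.pyRange 1 (((N / (j + 1) : Nat) : Int) + 1) 1).map
        fun q => ((j : Int) + 1) * q) ↔ m % (j + 1) = 0 := by
      constructor
      · intro hmm
        obtain ⟨q, hqL, hqe⟩ := List.mem_map.mp hmm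
        have hq := (PySem.List.mem_pyRange_one).mp hqL
        have hq0 : 0 ≤ q := by omega
        have hqn : ((j + 1) * q.toNat : Nat) = m := by
          have h2 : (((j + 1) * q.toNat : Nat) : Int) = (m : Int) := by
            push_cast [Int.toNat_of_nonneg hq0]
            exact hqe
          exact_mod_cast h2
        rw [← hqn]
        exact Nat.mul_mod_right (j + 1) q.toNat
      · intro hmod
        have hdvd : (j + 1) ∣ m := Nat.dvd_of_mod_eq_zero hmod
        have hqe : (j + 1) * (m / (j + 1)) = m := Nat.mul_div_cancel' hdvd
        have hq1 : 0 < m / (j + 1) := Nat.div_pos (Nat.le_of_dvd (by omega) hdvd) (by omega)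
        have hqle : m / (j + 1) ≤ N / (j + 1) := Nat.div_le_div_right hmN
        refine List.mem_map.mpr ⟨((m / (j + 1) : Nat) : Int), ?_, ?_⟩
        · exact (PySem.List.mem_pyRange_one).mpr ⟨by omega, by omega⟩
        · exact_mod_cast hqe
    by_cases hmod : m % (j + 1) = 0
    · rw [if_pos (hiff.mpr hmod), pvC_succ]
      simp [hmod]
    · rw [if_neg (fun h => hmod (hiff.mp h)), pvC_succ]
      simp [hmod]

-- counting divisors of m up to N ≥ m is the same as up to m
lemma pvC_stable (m : Nat) (hm : 1 ≤ m) : ∀ j, m ≤ j → pvC j m = pvC m m := by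
  intro j
  induction j with
  | zero => intro h; omega
  | succ j ih =>
    intro h
    rcases Nat.lt_or_ge m (j + 1) with hlt | hge
    · rw [pvC_succ, ih (by omega)]
      have h2 : m % (j + 1) = m := Nat.mod_eq_of_lt hlt
      have h3 : (m % (j + 1) == 0) = false := by
        rw [h2]
        simp
        omega
      simp [h3]
    · have he : m = j + 1 := by omega
      subst he
      rfl

lemma foldl_max_pm (g : Nat → Int) : ∀ j,
    ((List.range j).map (fun t => g (t + 2))).foldl max (g 1) = pvPM g j := by
  intro j
  induction j with
  | zero => rfl
  | succ j ih =>
    rw [List.range_succ, List.map_append, List.foldl_append, ih]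
    rfl

-- max(dv[:k]) is the running prefix max
lemma max_take (g : Nat → Int) (N k : Nat) (hk1 : 1 ≤ k) (hkN : k ≤ N) :
    PySem.List.max? (((List.range N).map (fun t => g (t + 1))).take k) (fun x => x) =
      some (pvPM g (k - 1)) := by
  obtain ⟨k', rfl⟩ : ∃ k', k = k' + 1 := ⟨k - 1, by omega⟩
  rw [← List.map_take, List.take_range, show min (k' + 1) N = k' + 1 by omega,
    List.range_succ_eq_map, List.map_cons, List.map_map, PySem.List.max?_id_cons]
  have hc : ((fun t => g (t + 1)) ∘ Nat.succ) = fun t => g (t + 2) := by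
    funext t
    simp [Nat.succ_eq_add_one]
  rw [hc, foldl_max_pm]
  simp

-- the two output loops produce the same list, and the running max is the prefix max
lemma loops_eq (g : Nat → Int) (N : Nat) (cnt : List Int)
    (hcnt : ∀ m : Nat, 1 ≤ m → m ≤ N → cnt.getD m 0 = g m) :
    ∀ j, 1 ≤ j → j ≤ N →
    ((PySem.List.pyRange 2 ((j : Int) + 1) 1).foldl
        (fun st k =>
          if st.2 < PySem.List.pyGetD cnt k 0 then (st.1 ++ [k], PySem.List.pyGetD cnt k 0) else st)
        (([1] : List Int), PySem.List.pyGetD cnt 1 0)) =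
      ((PySem.List.pyRange 1 (j : Int) 1).foldl
        (fun hc k =>
          if (PySem.List.max? (PySem.List.slice ((List.range N).map (fun t => g (t + 1))) none (some k)) (fun x => x)).getD 0 <
              PySem.List.pyGetD ((List.range N).map (fun t => g (t + 1))) k 0
          then hc ++ [k + 1] else hc) [1], pvPM g (j - 1)) := by
  intro j hj1
  induction j, hj1 using Nat.le_induction with
  | base =>
    intro hN
    rw [show (((1 : Nat) : Int) + 1) = 2 by norm_num,
      show ((1 : Nat) : Int) = 1 by norm_num,
      PySem.List.pyRange_one_eq_nil (le_refl (2 : Int)),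
      PySem.List.pyRange_one_eq_nil (le_refl (1 : Int)),
      List.foldl_nil, List.foldl_nil]
    have hg1 : PySem.List.pyGetD cnt 1 0 = g 1 := by
      rw [show (1 : Int) = ((1 : Nat) : Int) by norm_num, PySem.List.pyGetD_natCast]
      exact hcnt 1 le_rfl hN
    rw [hg1]
    rfl
  | succ j hj ih =>
    intro hjN
    have ih' := ih (by omega)
    rw [show (((j + 1 : Nat) : Int) + 1) = ((j : Int) + 1) + 1 by push_cast; ring,
      show ((j + 1 : Nat) : Int) = (j : Int) + 1 by push_cast; ring]
    rw [PySem.List.pyRange_one_succ_right (show (2 : Int) ≤ (j : Int) + 1 by omega),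
      PySem.List.pyRange_one_succ_right (show (1 : Int) ≤ (j : Int) by omega)]
    simp only [List.foldl_append, List.foldl_cons, List.foldl_nil]
    rw [ih']
    have hgB : PySem.List.pyGetD cnt ((j : Int) + 1) 0 = g (j + 1) := by
      rw [show ((j : Int) + 1) = ((j + 1 : Nat) : Int) by push_cast; ring,
        PySem.List.pyGetD_natCast]
      exact hcnt (j + 1) (by omega) hjN
    have hslice : PySem.List.slice ((List.range N).map (fun t => g (t + 1))) none (some (j : Int))
        = ((List.range N).map (fun t => g (t + 1))).take j := PySem.List.slice_to_natCast ..
    have hmax := max_take g N j hj (by omega)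
    have hgA : PySem.List.pyGetD ((List.range N).map (fun t => g (t + 1))) (j : Int) 0 = g (j + 1) := by
      rw [PySem.List.pyGetD_natCast, List.getD_eq_getElem?_getD, List.getElem?_map,
        List.getElem?_range (show j < N by omega)]
      rfl
    simp only [hslice, hmax, hgA, hgB, Option.getD_some]
    have hpm : pvPM g j = max (pvPM g (j - 1)) (g (j + 1)) := by
      obtain ⟨j', rfl⟩ : ∃ j', j = j' + 1 := ⟨j - 1, by omega⟩
      simp [pvPM]
    by_cases hlt : pvPM g (j - 1) < g (j + 1)
    · rw [if_pos hlt, if_pos hlt, Nat.add_sub_cancel, hpm, max_eq_right (le_of_lt hlt)]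
    · rw [if_neg hlt, if_neg hlt, Nat.add_sub_cancel, hpm, max_eq_left (not_lt.mp hlt)]

-- ===== VERDICT (by name: the statement is the Claim_ definition above) =====
theorem HighlyComposite_spec : Claim_equal_HighlyComposite := by
  intro n _
  unfold Spec_HighlyComposite
  by_cases hn : n < 2
  · simp [HighlyComposite, HighlyComposite_alt, hn]
  · have h0 : 0 ≤ n := by omega
    obtain ⟨N, rfl⟩ : ∃ N : Nat, n = (N : Int) := ⟨n.toNat, (Int.toNat_of_nonneg h0).symm⟩
    have hN2 : 2 ≤ N := by omega
    set g : Nat → Int := fun m => ((pvC m m : Nat) : Int) with hgdef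
    have hdv : (PySem.List.pyRange 1 ((N : Int) + 1) 1).map (fun i => ((DivisorsA i).length : Int))
        = (List.range N).map (fun t => g (t + 1)) := by
      rw [pvRange_eq N, List.map_map]
      apply List.map_congr_left
      intro t _
      simp only [Function.comp_apply]
      rw [show (1 : Int) + (t : Int) = ((t + 1 : Nat) : Int) by push_cast; ring,
        divisorsA_length (t + 1) (by omega)]
    have hT : ((N : Int) + 1).toNat = N + 1 := by omega
    have hsv : ((PySem.List.pyRange 1 ((N : Int) + 1) 1).foldl
        (fun cnt d =>
          (PySem.List.pyRange 1 (PySem.Int.floordiv (N : Int) d + 1) 1).foldl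
            (fun cnt q =>
              PySem.List.pySetD cnt (d * q) (PySem.List.pyGetD cnt (d * q) 0 + 1)) cnt)
        (List.replicate ((N : Int) + 1).toNat 0)) = pvSieve N N := by
      rw [hT]
      rfl
    obtain ⟨hlen, hval⟩ := sieve_outer N N le_rfl
    have hval' : ∀ m : Nat, 1 ≤ m → m ≤ N → (pvSieve N N).getD m 0 = g m := by
      intro m h1 hm
      rw [hval m h1 hm, pvC_stable m h1 N hm]
    have hloop := loops_eq g N (pvSieve N N) hval' N (by omega) le_rfl
    simp only [HighlyComposite, HighlyComposite_alt, if_neg hn]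
    rw [hdv, hsv]
    simp only [List.length_map, List.length_range]
    rw [hloop]
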